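-- pv_equiv track=rewrite | github.com/stormrider94/codewars_attempt | sum_of_differences_in_array.py | sum_of_differences
-- ===== SOURCE A (Python) =====
-- def sum_of_differences(arr):
--     arr.sort()
--     sum = 0
--     starting_index = len(arr)-1
--     for _ in range(len(arr)-1):
--         sum+=arr[starting_index]-(arr[starting_index-1])
--         starting_index -= 1
--     return sum
-- ===== SOURCE B (Python) =====
-- def sum_of_differences(arr):
--     return max(arr) - min(arr) if arr else 0
-- ===== Notes on version B (the rewrite author's own statement) =====
-- stated objective: faster
-- what changed: The sum of consecutive differences of the sorted array telescopes to max-min, so B returns max(arr)-min(arr) (0 for empty) without sorting or looping over pairs.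
import Mathlib
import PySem

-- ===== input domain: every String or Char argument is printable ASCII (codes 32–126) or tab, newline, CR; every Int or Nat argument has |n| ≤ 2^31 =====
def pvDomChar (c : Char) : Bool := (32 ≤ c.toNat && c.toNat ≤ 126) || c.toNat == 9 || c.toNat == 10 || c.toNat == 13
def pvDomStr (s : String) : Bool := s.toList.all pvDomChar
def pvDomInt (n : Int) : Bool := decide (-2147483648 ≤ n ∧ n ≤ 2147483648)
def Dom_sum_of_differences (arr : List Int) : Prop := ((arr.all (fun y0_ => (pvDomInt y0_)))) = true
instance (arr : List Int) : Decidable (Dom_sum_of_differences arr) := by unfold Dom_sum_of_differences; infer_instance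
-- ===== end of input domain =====

-- B replaces sort-then-telescoping-loop by the closed form max(arr)-min(arr) (0 if empty): asymptotically faster.
-- A sorts its argument in place; B does not mutate — the equivalence proved here is about the return value only.


-- ===== PORT A =====
-- loop body: sum += arr[starting_index] - arr[starting_index-1]; starting_index -= 1
-- (indices are always in range here, so pyGetD with default 0 is exact)
def sodStep (s : List Int) (st : Int × Int) (_ : Int) : Int × Int :=
  (st.1 + PySem.List.pyGetD s st.2 0 - PySem.List.pyGetD s (st.2 - 1) 0, st.2 - 1)

def sum_of_differences (arr : List Int) : Int :=
  let s := PySem.List.sorted arr (fun x => x) false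
  ((PySem.List.pyRange 0 ((s.length : Int) - 1) 1).foldl (sodStep s)
    (0, (s.length : Int) - 1)).1

-- ===== PORT B =====
def sum_of_differences_alt (arr : List Int) : Int :=
  match PySem.List.max? arr (fun x => x), PySem.List.min? arr (fun x => x) with
  | some M, some m => M - m
  | _, _ => 0

-- ===== PRECONDITION & SPEC =====
def Spec_sum_of_differences (arr : List Int) (out : Int) : Prop := out = sum_of_differences_alt arr
instance (arr : List Int) (out : Int) : Decidable (Spec_sum_of_differences arr out) := by unfold Spec_sum_of_differences; infer_instance

-- ===== CLAIM (what is proved, stated in full; the proofs are below) =====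
def Claim_equal_sum_of_differences : Prop := ∀ (arr : List Int), Dom_sum_of_differences arr → Spec_sum_of_differences arr (sum_of_differences arr)

-- ===== LEMMAS AND PROOFS =====

-- The loop telescopes: folding over range(k) from index j leaves sum = acc + s[j] - s[j-k].
theorem sod_telescope (s : List Int) (k : Nat) (j acc : Int) :
    (PySem.List.pyRange 0 (k : Int) 1).foldl (sodStep s) (acc, j) =
      (acc + PySem.List.pyGetD s j 0 - PySem.List.pyGetD s (j - k) 0, j - k) := by
  induction k generalizing j acc with
  | zero =>
      rw [show ((0:Nat):Int) = (0:Int) by simp, PySem.List.pyRange_one_eq_nil le_rfl]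
      simp only [List.foldl_nil, sub_zero, Prod.mk.injEq]
      exact ⟨by ring, trivial⟩
  | succ n ih =>
      have h : ((n + 1 : Nat) : Int) = (n : Int) + 1 := by push_cast; ring
      rw [h, PySem.List.pyRange_one_succ_right (by positivity), List.foldl_append, ih]
      simp only [List.foldl_cons, List.foldl_nil, sodStep, Prod.mk.injEq]
      constructor
      · ring_nf
      · ring

theorem max_eq_last_sorted (arr : List Int) (h : arr ≠ [])
    (hlen : (PySem.List.sorted arr (fun x => x) false).length - 1 <
            (PySem.List.sorted arr (fun x => x) false).length) :
    PySem.List.max? arr (fun x => x) =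
      some (PySem.List.sorted arr (fun x => x) false)[(PySem.List.sorted arr (fun x => x) false).length - 1] := by
  obtain ⟨M, hM⟩ : ∃ M, PySem.List.max? arr (fun x => x) = some M := by
    cases hmax : PySem.List.max? arr (fun x => x) with
    | none => exact absurd ((PySem.List.max?_eq_none_iff arr _).mp hmax) h
    | some M => exact ⟨M, rfl⟩
  rw [hM]
  have hMs : M ∈ PySem.List.sorted arr (fun x => x) false :=
    (PySem.List.mem_sorted arr _ false M).mpr (PySem.List.max?_mem hM)
  have h1 : (PySem.List.sorted arr (fun x => x) false)[(PySem.List.sorted arr (fun x => x) false).length - 1] ≤ M :=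
    PySem.List.max?_isMax hM _
      ((PySem.List.mem_sorted arr _ false _).mp (List.getElem_mem hlen))
  obtain ⟨p, hp, hpe⟩ := List.mem_iff_getElem.mp hMs
  have h2 : M ≤ (PySem.List.sorted arr (fun x => x) false)[(PySem.List.sorted arr (fun x => x) false).length - 1] := by
    rw [← hpe]
    simpa using PySem.List.key_sorted_getElem_mono arr (fun x => x) (by omega) hlen
  exact congrArg some (le_antisymm h2 h1)

theorem min_eq_head_sorted (arr : List Int) (h : arr ≠ [])
    (m0 : Int) (t : List Int)
    (hs : PySem.List.sorted arr (fun x => x) false = m0 :: t) :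
    PySem.List.min? arr (fun x => x) = some m0 := by
  obtain ⟨m, hm⟩ : ∃ m, PySem.List.min? arr (fun x => x) = some m := by
    cases hmin : PySem.List.min? arr (fun x => x) with
    | none => exact absurd ((PySem.List.min?_eq_none_iff arr _).mp hmin) h
    | some m => exact ⟨m, rfl⟩
  rw [hm]
  have hmarr : m ∈ arr := PySem.List.min?_mem hm
  have h0arr : m0 ∈ arr := (PySem.List.mem_sorted arr _ false m0).mp (hs ▸ List.mem_cons_self)
  have h1 : m0 ≤ m := by simpa using PySem.List.key_head_sorted_le arr (fun x => x) hs m hmarr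
  have h2 : m ≤ m0 := PySem.List.min?_isMin hm m0 h0arr
  exact congrArg some (le_antisymm h2 h1)

-- ===== VERDICT (by name: the statement is the Claim_ definition above) =====
theorem sum_of_differences_spec : Claim_equal_sum_of_differences := by
  intro arr _
  unfold Spec_sum_of_differences sum_of_differences sum_of_differences_alt
  by_cases h : arr = []
  · subst h
    decide
  · obtain ⟨m0, t, hs⟩ : ∃ m0 t, PySem.List.sorted arr (fun x => x) false = m0 :: t := by
      cases hcase : PySem.List.sorted arr (fun x => x) false with
      | nil => exact absurd ((PySem.List.sorted_eq_nil_iff arr _ false).mp hcase) h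
      | cons a b => exact ⟨a, b, rfl⟩
    have hlen1 : 1 ≤ (PySem.List.sorted arr (fun x => x) false).length := by
      rw [hs]; simp
    have hlen : (PySem.List.sorted arr (fun x => x) false).length - 1 <
                (PySem.List.sorted arr (fun x => x) false).length := by omega
    rw [max_eq_last_sorted arr h hlen, min_eq_head_sorted arr h m0 t hs]
    have hcast : ((PySem.List.sorted arr (fun x => x) false).length : Int) - 1 =
        (((PySem.List.sorted arr (fun x => x) false).length - 1 : Nat) : Int) := by omega
    simp only [hcast, sod_telescope, sub_self]
    rw [PySem.List.pyGetD_eq_getElem _ _ (by positivity) (by exact_mod_cast (by omega : ((PySem.List.sorted arr (fun x => x) false).length - 1 : Nat) < (PySem.List.sorted arr (fun x => x) false).length))]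
    rw [PySem.List.pyGetD_eq_getElem _ _ (by norm_num) (by exact_mod_cast (by omega : (0:Nat) < (PySem.List.sorted arr (fun x => x) false).length))]
    simp [hs, Int.toNat_natCast]
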